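-- pv_equiv track=rewrite | github.com/matheuscordeiro/Codility | Lessons/Leader/Dominator/solution.py | solution
-- ===== SOURCE A (Python) =====
-- def solution(A):
--     count = {}
--     size_A = len(A)
--     for i, a in enumerate(A):
--         count[a] = count.get(a, 0) + 1
--         if count[a] > size_A // 2:
--             return i
--
--     return -1
-- ===== SOURCE B (Python) =====
-- def solution(A):
--     n = len(A)
--     h = n // 2
--     # Boyer-Moore majority vote
--     cand = 0
--     votes = 0
--     for a in A:
--         if votes == 0:
--             cand = a
--             votes = 1
--         elif a == cand:
--             votes += 1
--         else:
--             votes -= 1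
--     # verify the candidate really is a dominator
--     if n == 0 or A.count(cand) <= h:
--         return -1
--     # first index where the running count of the dominator exceeds half
--     c = 0
--     for i, a in enumerate(A):
--         if a == cand:
--             c += 1
--             if c > h:
--                 return i
--     return -1
-- ===== Notes on version B (the rewrite author's own statement) =====
-- stated objective: faster
-- what changed: Replaced the dictionary-of-counts scan by a Boyer-Moore majority vote (candidate + vote counter), a verification count, and a single running-count scan of the candidate only, using O(1) extra space instead of a hash map.
import Mathlib
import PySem

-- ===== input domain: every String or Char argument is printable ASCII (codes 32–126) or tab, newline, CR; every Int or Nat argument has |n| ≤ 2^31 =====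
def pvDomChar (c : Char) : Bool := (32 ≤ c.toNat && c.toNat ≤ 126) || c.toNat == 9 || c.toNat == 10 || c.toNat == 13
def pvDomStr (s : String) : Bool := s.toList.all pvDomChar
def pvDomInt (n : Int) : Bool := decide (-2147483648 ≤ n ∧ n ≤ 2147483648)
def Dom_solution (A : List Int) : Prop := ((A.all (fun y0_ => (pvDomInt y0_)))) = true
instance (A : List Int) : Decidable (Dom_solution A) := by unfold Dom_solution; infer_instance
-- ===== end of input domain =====

-- B replaces A's dictionary of counts by a Boyer-Moore majority vote plus a
-- verification count and a single running-count scan of the candidate (O(1) extra space).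

-- ===== PORT A =====
-- the for-loop of A with early return: state = (counter dict, current index)
def solutionGo (size_A : Int) (cnt : PySem.Dict Int Int) (i : Int) : List Int → Int
  | [] => -1
  | a :: rest =>
    let cnt' := cnt.insert a (cnt.getD a 0 + 1)
    if cnt'.getD a 0 > PySem.Int.floordiv size_A 2 then i
    else solutionGo size_A cnt' (i + 1) rest

def solution (A : List Int) : Int := solutionGo (A.length : Int) PySem.Dict.empty 0 A

-- ===== PORT B =====
-- Boyer-Moore vote loop: state = (cand, votes)
def bmGo (cand votes : Int) : List Int → Int × Int
  | [] => (cand, votes)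
  | a :: rest =>
    if votes = 0 then bmGo a 1 rest
    else if a = cand then bmGo cand (votes + 1) rest
    else bmGo cand (votes - 1) rest

-- final scan of B: running count c of cand, index i
def scanGo (cand h : Int) (c i : Int) : List Int → Int
  | [] => -1
  | a :: rest =>
    if a = cand then
      if c + 1 > h then i else scanGo cand h (c + 1) (i + 1) rest
    else scanGo cand h c (i + 1) rest

def solution_alt (A : List Int) : Int :=
  let n : Int := (A.length : Int)
  let h : Int := PySem.Int.floordiv n 2
  let cand : Int := (bmGo 0 0 A).1
  if n = 0 ∨ (PySem.List.count A cand : Int) ≤ h then -1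
  else scanGo cand h 0 0 A

-- ===== PRECONDITION & SPEC =====
def Spec_solution (A : List Int) (out : Int) : Prop := out = solution_alt A
instance (A : List Int) (out : Int) : Decidable (Spec_solution A out) := by unfold Spec_solution; infer_instance

-- ===== CLAIM (what is proved, stated in full; the proofs are below) =====
def Claim_equal_solution : Prop := ∀ (A : List Int), Dom_solution A → Spec_solution A (solution A)

-- ===== LEMMAS AND PROOFS =====

-- reference loop: A's loop with the dict replaced by the prefix processed so far
def refGo (h : Int) (pre : List Int) (i : Int) : List Int → Int
  | [] => -1
  | a :: rest =>
    if ((pre.count a : Int) + 1 > h) then i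
    else refGo h (pre ++ [a]) (i + 1) rest

lemma goA_eq_ref (rest : List Int) : ∀ (n : Int) (d : PySem.Dict Int Int) (pre : List Int) (i : Int),
    (∀ x, d.getD x 0 = (pre.count x : Int)) →
    solutionGo n d i rest = refGo (PySem.Int.floordiv n 2) pre i rest := by
  induction rest with
  | nil => intro n d pre i _; rfl
  | cons a rest ih =>
    intro n d pre i hd
    simp only [solutionGo, refGo, PySem.Dict.getD_insert_self, hd a]
    split
    · rfl
    · exact ih n _ (pre ++ [a]) (i + 1) (by
        intro x
        rw [PySem.Dict.getD_insert]
        rcases eq_or_ne x a with rfl | hx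
        · simp [hd x, List.count_append]
        · simp [hx, Ne.symm hx, hd x, List.count_append, List.count_cons])

lemma refGo_neg_one (h : Int) : ∀ (rest pre : List Int) (i : Int),
    (∀ x, (((pre ++ rest).count x : Nat) : Int) ≤ h) →
    refGo h pre i rest = -1 := by
  intro rest
  induction rest with
  | nil => intro pre i _; rfl
  | cons a rest ih =>
    intro pre i hb
    have key : ((List.count a (pre ++ a :: rest) : Nat) : Int) ≤ h := hb a
    rw [List.count_append, List.count_cons_self] at key
    push_cast at key
    simp only [refGo]
    rw [if_neg (by omega)]
    exact ih (pre ++ [a]) (i + 1) (by intro x; have := hb x; simpa using this)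

lemma ref_eq_scan (cand h : Int) : ∀ (rest pre : List Int) (i c : Int),
    (∀ y, y ≠ cand → (((pre ++ rest).count y : Nat) : Int) ≤ h) →
    c = (pre.count cand : Int) →
    refGo h pre i rest = scanGo cand h c i rest := by
  intro rest
  induction rest with
  | nil => intro pre i c _ _; rfl
  | cons a rest ih =>
    intro pre i c hb hc
    rcases eq_or_ne a cand with rfl | ha
    · simp only [refGo, scanGo, hc]
      split
      · rfl
      · exact ih (pre ++ [a]) (i + 1) _ (by intro y hy; have := hb y hy; simpa using this)
          (by simp [List.count_append])
    · have key : ((List.count a (pre ++ a :: rest) : Nat) : Int) ≤ h := hb a ha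
      rw [List.count_append, List.count_cons_self] at key
      push_cast at key
      have hcnt : ¬ ((pre.count a : Int) + 1 > h) := by omega
      simp only [refGo, scanGo]
      rw [if_neg hcnt, if_neg ha]
      exact ih (pre ++ [a]) (i + 1) c (by intro y hy; have := hb y hy; simpa using this)
        (by simp [hc, List.count_append, List.count_cons]; exact ha)

-- Boyer-Moore invariant
def BmInv (l : List Int) (c m : Int) : Prop :=
  0 ≤ m ∧ (∀ x, x ≠ c → 2 * (l.count x : Int) ≤ (l.length : Int) - m) ∧
    2 * (l.count c : Int) ≤ (l.length : Int) + m

lemma bm_inv : ∀ (rest pre : List Int) (c m : Int), BmInv pre c m →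
    BmInv (pre ++ rest) (bmGo c m rest).1 (bmGo c m rest).2 := by
  intro rest
  induction rest with
  | nil => intro pre c m hI; simpa using hI
  | cons a rest ih =>
    intro pre c m hI
    obtain ⟨hm, h2, h3⟩ := hI
    have hass : pre ++ a :: rest = (pre ++ [a]) ++ rest := by simp
    rw [hass]
    by_cases h0 : m = 0
    · subst h0
      simp only [bmGo, if_pos rfl]
      refine ih (pre ++ [a]) a 1 ⟨by omega, ?_, ?_⟩
      · intro x hx
        have hle : 2 * (pre.count x : Int) ≤ (pre.length : Int) := by
          rcases eq_or_ne x c with rfl | hxc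
          · omega
          · have := h2 x hxc; omega
        simp [List.count_append, List.count_singleton, hx]
        omega
      · have hle : 2 * (pre.count a : Int) ≤ (pre.length : Int) := by
          rcases eq_or_ne a c with rfl | hac
          · omega
          · have := h2 a hac; omega
        simp [List.count_append]
        omega
    · rcases eq_or_ne a c with rfl | hac
      · simp only [bmGo, if_neg h0, if_pos rfl]
        refine ih (pre ++ [a]) a (m + 1) ⟨by omega, ?_, ?_⟩
        · intro x hx
          have := h2 x hx
          simp [List.count_append, List.count_singleton, hx]
          omega
        · simp [List.count_append]
          omega
      · simp only [bmGo, if_neg h0, if_neg hac]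
        refine ih (pre ++ [a]) c (m - 1) ⟨by omega, ?_, ?_⟩
        · intro x hx
          rcases eq_or_ne x a with rfl | hxa
          · have := h2 x hx
            simp [List.count_append]
            omega
          · have := h2 x hx
            simp [List.count_append, List.count_singleton, hxa]
            omega
        · have := h3
          simp [List.count_append, List.count_singleton, hac, Ne.symm hac]
          omega

lemma count_add_count_le (x y : Int) (hxy : x ≠ y) : ∀ (l : List Int),
    l.count x + l.count y ≤ l.length := by
  intro l
  induction l with
  | nil => simp
  | cons a t ih =>
    simp only [List.length_cons]
    rcases eq_or_ne x a with rfl | h1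
    · rw [List.count_cons_self, List.count_cons_of_ne hxy]
      omega
    · rw [List.count_cons_of_ne h1.symm]
      rcases eq_or_ne y a with rfl | h2
      · rw [List.count_cons_self]; omega
      · rw [List.count_cons_of_ne h2.symm]; omega

-- if x is a strict majority element, x is the Boyer-Moore candidate
lemma bm_majority (A : List Int) (x : Int)
    (hx : (A.length : Int) < 2 * (A.count x : Int)) : x = (bmGo 0 0 A).1 := by
  have hI : BmInv A (bmGo 0 0 A).1 (bmGo 0 0 A).2 := by
    simpa using bm_inv A [] 0 0 ⟨le_refl 0, by intro z _; simp, by simp⟩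
  obtain ⟨hm, h2, _⟩ := hI
  by_contra hne
  have := h2 x hne
  omega

lemma half_lt (n cnt : Nat) (h : ((n / 2 : Nat) : Int) < (cnt : Int)) :
    (n : Int) < 2 * (cnt : Int) := by
  have : n / 2 < cnt := by exact_mod_cast h
  omega

-- ===== VERDICT (by name: the statement is the Claim_ definition above) =====
theorem solution_spec : Claim_equal_solution := by
  intro A _
  unfold Spec_solution solution solution_alt
  have hh : PySem.Int.floordiv (A.length : Int) 2 = ((A.length / 2 : Nat) : Int) :=
    PySem.Int.floordiv_natCast A.length 2
  have hA : solutionGo (A.length : Int) PySem.Dict.empty 0 A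
      = refGo (PySem.Int.floordiv (A.length : Int) 2) [] 0 A :=
    goA_eq_ref A _ _ [] 0 (by intro x; simp [PySem.Dict.getD, PySem.Dict.get?, PySem.Dict.empty])
  rw [hA]
  set cand := (bmGo 0 0 A).1 with hcand
  by_cases hEx : ∃ x, ((A.length / 2 : Nat) : Int) < (A.count x : Int)
  · obtain ⟨x, hx⟩ := hEx
    have hxc : x = cand := bm_majority A x (half_lt _ _ hx)
    have hlen : A.length ≠ 0 := by
      intro h0
      have hnil : A = [] := List.length_eq_zero_iff.mp h0
      subst hnil
      simp at hx
    have hcond : ¬ ((A.length : Int) = 0 ∨ (PySem.List.count A cand : Int) ≤ PySem.Int.floordiv (A.length : Int) 2) := by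
      push_neg
      refine ⟨by exact_mod_cast hlen, ?_⟩
      rw [hh, PySem.List.count_eq, ← hxc]
      exact hx
    rw [if_neg hcond]
    refine ref_eq_scan cand _ A [] 0 0 ?_ (by simp)
    intro y hy
    simp only [List.nil_append]
    by_contra hgt
    push_neg at hgt
    rw [hh] at hgt
    have h1 : A.length / 2 < A.count y := by exact_mod_cast hgt
    have h2 : A.length / 2 < A.count x := by exact_mod_cast hx
    have := count_add_count_le y x (by rw [hxc]; exact hy) A
    omega
  · push_neg at hEx
    rw [refGo_neg_one _ A [] 0 (by intro x; simpa [hh] using hEx x)]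
    rcases eq_or_ne A.length 0 with h0 | h0
    · rw [if_pos (Or.inl (by exact_mod_cast h0))]
    · rw [if_pos (Or.inr (by rw [PySem.List.count_eq, hh]; exact hEx cand))]
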